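-- pv_equiv track=rewrite | github.com/martinotin24/Assigment7-python | bitwise_operations.py | bitwise_operations
-- ===== SOURCE A (Python) =====
-- def bitwise_operations(numbers):
--     if not numbers:
--         return None, None, None
--     # Initialize with the first number
--     bitwise_and = numbers[0]
--     bitwise_or = numbers[0]
--     bitwise_xor = numbers[0]
--
--     # Perform operations on the rest of the numbers
--     for num in numbers[1:]:
--         bitwise_and &= num
--         bitwise_or |= num
--         bitwise_xor ^= num
--     return bitwise_and, bitwise_or, bitwise_xor
-- ===== SOURCE B (Python) =====
-- def _solve(chunk):
--     # divide and conquer: combine the triples of the two halves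
--     if len(chunk) == 1:
--         v = chunk[0]
--         return (v, v, v)
--     m = len(chunk) // 2
--     a1, o1, x1 = _solve(chunk[:m])
--     a2, o2, x2 = _solve(chunk[m:])
--     return (a1 & a2, o1 | o2, x1 ^ x2)
--
-- def bitwise_operations(numbers):
--     if not numbers:
--         return None, None, None
--     return _solve(numbers)
-- ===== Notes on version B (the rewrite author's own statement) =====
-- stated objective: alternative
-- what changed: Replaces A's single left-to-right loop with three accumulators by a divide-and-conquer recursion that splits the list in halves and merges the two half-triples with &,|,^ (correct because all three operators are associative).
import Mathlib
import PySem

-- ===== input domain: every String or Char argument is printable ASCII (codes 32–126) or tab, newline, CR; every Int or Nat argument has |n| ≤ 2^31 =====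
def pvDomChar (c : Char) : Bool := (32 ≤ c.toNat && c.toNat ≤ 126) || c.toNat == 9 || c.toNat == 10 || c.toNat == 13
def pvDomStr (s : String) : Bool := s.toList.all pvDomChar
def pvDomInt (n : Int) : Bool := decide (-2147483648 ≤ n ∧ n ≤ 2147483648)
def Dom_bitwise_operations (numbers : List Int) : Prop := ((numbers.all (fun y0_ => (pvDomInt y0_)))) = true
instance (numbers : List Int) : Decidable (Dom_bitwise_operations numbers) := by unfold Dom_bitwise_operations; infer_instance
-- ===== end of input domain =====

-- B replaces A's single left-to-right loop with three accumulators by a divide-and-conquer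
-- recursion splitting the list in halves (alternative decomposition; same return value).

-- ===== PORT A =====
-- one pass over numbers[1:], folding the triple (and, or, xor) state
def bitwise_operations (numbers : List Int) : Option Int × Option Int × Option Int :=
  match numbers with
  | [] => (none, none, none)
  | h :: t =>
    let s := t.foldl (fun (acc : Int × Int × Int) num =>
      (PySem.Int.band acc.1 num, PySem.Int.bor acc.2.1 num, PySem.Int.bxor acc.2.2 num)) (h, h, h)
    (some s.1, some s.2.1, some s.2.2)

-- ===== PORT B =====
-- _solve(chunk): divide and conquer over a nonempty chunk; halves via take/drop (Python's chunk[:m]/chunk[m:])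
def pvSolve : List Int → Int × Int × Int
  | [] => (0, 0, 0)   -- unreachable: _solve is only called on nonempty chunks
  | [v] => (v, v, v)
  | x :: y :: rest =>
    let m := (x :: y :: rest).length / 2
    let l := pvSolve ((x :: y :: rest).take m)
    let r := pvSolve ((x :: y :: rest).drop m)
    (PySem.Int.band l.1 r.1, PySem.Int.bor l.2.1 r.2.1, PySem.Int.bxor l.2.2 r.2.2)
termination_by xs => xs.length
decreasing_by
  · simp; omega
  · simp; omega

def bitwise_operations_alt (numbers : List Int) : Option Int × Option Int × Option Int :=
  match numbers with
  | [] => (none, none, none)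
  | _ :: _ =>
    let s := pvSolve numbers
    (some s.1, some s.2.1, some s.2.2)

-- ===== PRECONDITION & SPEC =====
def Spec_bitwise_operations (numbers : List Int) (out : Option Int × Option Int × Option Int) : Prop := out = bitwise_operations_alt numbers
instance (numbers : List Int) (out : Option Int × Option Int × Option Int) : Decidable (Spec_bitwise_operations numbers out) := by unfold Spec_bitwise_operations; infer_instance

-- ===== CLAIM (what is proved, stated in full; the proofs are below) =====
def Claim_equal_bitwise_operations : Prop := ∀ (numbers : List Int), Dom_bitwise_operations numbers → Spec_bitwise_operations numbers (bitwise_operations numbers)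

-- ===== LEMMAS AND PROOFS =====

-- Python's signed bitwise semantics, bit by bit: bit k of a (two's complement)
def pvTb (a : Int) (k : Nat) : Bool := if 0 ≤ a then a.toNat.testBit k else !((-a-1).toNat.testBit k)

theorem pv_sub_and (a : Nat) : ∀ m : Nat, a - (a &&& m) = Nat.ldiff a m := by
  induction a using Nat.binaryRec with
  | zero => intro m; simp [Nat.ldiff]
  | bit b n ih =>
    intro m
    induction m using Nat.bitCasesOn with
    | bit b' m' =>
      rw [Nat.land_bit, Nat.ldiff_bit, ← ih m']
      have h1 : n &&& m' ≤ n := Nat.and_le_left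
      cases b <;> cases b' <;> simp [Nat.bit_val] <;> omega

theorem pvTb_band (a b : Int) (k : Nat) : pvTb (PySem.Int.band a b) k = (pvTb a k && pvTb b k) := by
  unfold pvTb PySem.Int.band
  by_cases ha : (0:Int) ≤ a <;> by_cases hb : (0:Int) ≤ b <;>
    simp only [ha, hb, if_true, if_false]
  · simp [Nat.testBit_and]
  · simp [pv_sub_and, Nat.testBit_ldiff]
  · simp [pv_sub_and, Nat.testBit_ldiff, Bool.and_comm]
  · simp [Nat.testBit_or]
    omega

theorem pvTb_bor (a b : Int) (k : Nat) : pvTb (PySem.Int.bor a b) k = (pvTb a k || pvTb b k) := by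
  unfold pvTb PySem.Int.bor
  by_cases ha : (0:Int) ≤ a <;> by_cases hb : (0:Int) ≤ b <;>
    simp only [ha, hb, if_true, if_false]
  · simp [Nat.testBit_or]
  · have h1 : ¬ (0:Int) ≤ -↑((-b - 1).toNat - ((-b - 1).toNat &&& a.toNat)) - 1 := by
      have := Int.natCast_nonneg ((-b - 1).toNat - ((-b - 1).toNat &&& a.toNat)); omega
    have h2 : (-(-↑((-b - 1).toNat - ((-b - 1).toNat &&& a.toNat)) - 1) - 1 : Int).toNat
        = (-b - 1).toNat - ((-b - 1).toNat &&& a.toNat) := by omega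
    rw [if_neg h1, h2, pv_sub_and, Nat.testBit_ldiff]
    cases a.toNat.testBit k <;> cases ((-b - 1).toNat).testBit k <;> rfl
  · have h1 : ¬ (0:Int) ≤ -↑((-a - 1).toNat - ((-a - 1).toNat &&& b.toNat)) - 1 := by
      have := Int.natCast_nonneg ((-a - 1).toNat - ((-a - 1).toNat &&& b.toNat)); omega
    have h2 : (-(-↑((-a - 1).toNat - ((-a - 1).toNat &&& b.toNat)) - 1) - 1 : Int).toNat
        = (-a - 1).toNat - ((-a - 1).toNat &&& b.toNat) := by omega
    rw [if_neg h1, h2, pv_sub_and, Nat.testBit_ldiff]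
    cases b.toNat.testBit k <;> cases ((-a - 1).toNat).testBit k <;> rfl
  · have h1 : ¬ (0:Int) ≤ -↑((-a - 1).toNat &&& (-b - 1).toNat) - 1 := by
      have := Int.natCast_nonneg ((-a - 1).toNat &&& (-b - 1).toNat); omega
    have h2 : (-(-↑((-a - 1).toNat &&& (-b - 1).toNat) - 1) - 1 : Int).toNat
        = (-a - 1).toNat &&& (-b - 1).toNat := by omega
    rw [if_neg h1, h2, Nat.testBit_and]
    cases ((-a - 1).toNat).testBit k <;> cases ((-b - 1).toNat).testBit k <;> rfl

theorem pvTb_bxor (a b : Int) (k : Nat) : pvTb (PySem.Int.bxor a b) k = xor (pvTb a k) (pvTb b k) := by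
  unfold pvTb PySem.Int.bxor
  by_cases ha : (0:Int) ≤ a <;> by_cases hb : (0:Int) ≤ b <;>
    simp only [ha, hb, if_true, if_false]
  · simp [Nat.testBit_xor]
  · have h1 : ¬ (0:Int) ≤ -↑(a.toNat ^^^ (-b - 1).toNat) - 1 := by
      have := Int.natCast_nonneg (a.toNat ^^^ (-b - 1).toNat); omega
    have h2 : (-(-↑(a.toNat ^^^ (-b - 1).toNat) - 1) - 1 : Int).toNat
        = a.toNat ^^^ (-b - 1).toNat := by omega
    rw [if_neg h1, h2, Nat.testBit_xor]
    cases a.toNat.testBit k <;> cases ((-b - 1).toNat).testBit k <;> rfl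
  · have h1 : ¬ (0:Int) ≤ -↑((-a - 1).toNat ^^^ b.toNat) - 1 := by
      have := Int.natCast_nonneg ((-a - 1).toNat ^^^ b.toNat); omega
    have h2 : (-(-↑((-a - 1).toNat ^^^ b.toNat) - 1) - 1 : Int).toNat
        = (-a - 1).toNat ^^^ b.toNat := by omega
    rw [if_neg h1, h2, Nat.testBit_xor]
    cases ((-a - 1).toNat).testBit k <;> cases b.toNat.testBit k <;> rfl
  · have h1 : (0:Int) ≤ ↑((-a - 1).toNat ^^^ (-b - 1).toNat) := Int.natCast_nonneg _
    rw [if_pos h1, Int.toNat_natCast, Nat.testBit_xor]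
    cases ((-a - 1).toNat).testBit k <;> cases ((-b - 1).toNat).testBit k <;> rfl

theorem pvTb_mixed_false (x y : Nat) : ¬ (x.testBit (x + y) = !(y.testBit (x + y))) := by
  have hx : x.testBit (x + y) = false :=
    Nat.testBit_lt_two_pow (lt_of_lt_of_le (Nat.lt_two_pow_self)
      (Nat.pow_le_pow_right (by norm_num) (Nat.le_add_right x y)))
  have hy : y.testBit (x + y) = false :=
    Nat.testBit_lt_two_pow (lt_of_lt_of_le (Nat.lt_two_pow_self)
      (Nat.pow_le_pow_right (by norm_num) (Nat.le_add_left y x)))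
  simp [hx, hy]

theorem pvTb_inj (a b : Int) (h : ∀ k, pvTb a k = pvTb b k) : a = b := by
  unfold pvTb at h
  by_cases ha : (0:Int) ≤ a <;> by_cases hb : (0:Int) ≤ b
  · have := Nat.eq_of_testBit_eq (x := a.toNat) (y := b.toNat)
      (fun k => by have hk := h k; simpa [ha, hb] using hk)
    omega
  · exact absurd (by simpa [ha, hb] using h (a.toNat + (-b - 1).toNat))
      (pvTb_mixed_false a.toNat (-b - 1).toNat)
  · exact absurd (by simpa [ha, hb] using (h (b.toNat + (-a - 1).toNat)).symm)
      (pvTb_mixed_false b.toNat (-a - 1).toNat)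
  · have := Nat.eq_of_testBit_eq (x := (-a).toNat - 1) (y := (-b).toNat - 1)
      (fun k => by have hk := h k; simp [ha, hb] at hk; exact hk)
    omega

theorem pv_band_assoc (a b c : Int) :
    PySem.Int.band (PySem.Int.band a b) c = PySem.Int.band a (PySem.Int.band b c) :=
  pvTb_inj _ _ (fun k => by simp [pvTb_band, Bool.and_assoc])

theorem pv_bor_assoc (a b c : Int) :
    PySem.Int.bor (PySem.Int.bor a b) c = PySem.Int.bor a (PySem.Int.bor b c) :=
  pvTb_inj _ _ (fun k => by simp [pvTb_bor, Bool.or_assoc])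

theorem pv_bxor_assoc (a b c : Int) :
    PySem.Int.bxor (PySem.Int.bxor a b) c = PySem.Int.bxor a (PySem.Int.bxor b c) :=
  pvTb_inj _ _ (fun k => by simp [pvTb_bxor])

theorem pv_op_foldl (op : Int → Int → Int)
    (hop : ∀ a b c, op (op a b) c = op a (op b c)) (t : List Int) :
    ∀ x b : Int, op x (t.foldl op b) = t.foldl op (op x b) := by
  induction t with
  | nil => intro x b; rfl
  | cons c t ih =>
    intro x b
    simp only [List.foldl]
    rw [ih, ← hop]

theorem pv_combine (op : Int → Int → Int)
    (hop : ∀ a b c, op (op a b) c = op a (op b c)) (t1 t2 : List Int) (x b : Int) :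
    op (t1.foldl op x) (t2.foldl op b) = (t1 ++ b :: t2).foldl op x := by
  rw [List.foldl_append]
  simp only [List.foldl]
  rw [pv_op_foldl op hop]

theorem pv_triple_split (t : List Int) : ∀ (a b c : Int),
    t.foldl (fun (acc : Int × Int × Int) num =>
      (PySem.Int.band acc.1 num, PySem.Int.bor acc.2.1 num, PySem.Int.bxor acc.2.2 num)) (a, b, c)
    = (t.foldl (fun x y => PySem.Int.band x y) a, t.foldl (fun x y => PySem.Int.bor x y) b,
       t.foldl (fun x y => PySem.Int.bxor x y) c) := by
  induction t with
  | nil => intro a b c; rfl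
  | cons h t ih => intro a b c; simp [List.foldl, ih]

theorem pvSolve_eq : ∀ (n : Nat) (xs : List Int), xs.length ≤ n → ∀ (h : Int) (t : List Int), xs = h :: t →
    pvSolve xs = (t.foldl (fun x y => PySem.Int.band x y) h,
                  t.foldl (fun x y => PySem.Int.bor x y) h,
                  t.foldl (fun x y => PySem.Int.bxor x y) h) := by
  intro n
  induction n with
  | zero => intro xs hlen h t hx; subst hx; simp at hlen
  | succ n ih =>
    intro xs hlen h t hx
    subst hx
    cases t with
    | nil => simp [pvSolve]
    | cons y rest =>
      rw [pvSolve]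
      have hm : (h :: y :: rest).length / 2 = rest.length / 2 + 1 := by
        simp; omega
      obtain ⟨m', hm'⟩ : ∃ m', (h :: y :: rest).length / 2 = m' + 1 := ⟨rest.length / 2, hm⟩
      have hm'lt : m' < (y :: rest).length := by
        simp at hm' ⊢; omega
      have htake : (h :: y :: rest).take ((h :: y :: rest).length / 2)
          = h :: (y :: rest).take m' := by rw [hm']; rfl
      have hdrop : (h :: y :: rest).drop ((h :: y :: rest).length / 2)
          = (y :: rest).drop m' := by rw [hm']; rfl
      have hd : (y :: rest).drop m' ≠ [] := by
        rw [Ne, List.drop_eq_nil_iff]; omega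
      obtain ⟨b, t2, hbt⟩ := List.exists_cons_of_ne_nil hd
      have hsplit : (y :: rest).take m' ++ b :: t2 = y :: rest := by
        rw [← hbt]; exact List.take_append_drop m' (y :: rest)
      have hlen1 : (h :: (y :: rest).take m').length ≤ n := by
        simp [List.length_take]; simp at hlen; omega
      have hlen2 : (b :: t2).length ≤ n := by
        have := congrArg List.length hbt
        simp [List.length_drop] at this
        simp at hlen ⊢; omega
      rw [htake, hdrop, hbt,
        ih _ hlen1 h ((y :: rest).take m') rfl,
        ih _ hlen2 b t2 rfl]
      rw [pv_combine _ pv_band_assoc, pv_combine _ pv_bor_assoc, pv_combine _ pv_bxor_assoc]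
      simp only [hsplit]

-- ===== VERDICT (by name: the statement is the Claim_ definition above) =====
theorem bitwise_operations_spec : Claim_equal_bitwise_operations := by
  intro numbers _
  unfold Spec_bitwise_operations bitwise_operations bitwise_operations_alt
  cases numbers with
  | nil => rfl
  | cons h t =>
    simp only
    rw [pvSolve_eq (h :: t).length (h :: t) le_rfl h t rfl, pv_triple_split]
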